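-- pv_equiv track=rewrite | github.com/pypi-data/pypi-mirror-373 | packages/qualitative-reasoning/qualitative_reasoning-1.1.0.tar.gz/qualitative_reasoning-1.1.0/qualitative_reasoning.py | _infer_domain_relationships
-- ===== SOURCE A (Python) =====
-- from typing import Dict, List, Tuple, Union, Optional, Any, Set, Callable
--
-- def _infer_domain_relationships(qty_names: List[str]) -> Dict[str, str]:
--     """Infer relationships based on domain-specific knowledge patterns."""
--     domain_rels = {}
--
--     # Common domain patterns (can be extended with domain-specific knowledge)
--     domain_patterns = {
--         # Physical systems
--         ('temperature', 'pressure'): 'thermal_relationship',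
--         ('flow_rate', 'pressure'): 'fluid_dynamics',
--         ('speed', 'kinetic_energy'): 'mechanical_energy',
--
--         # Economic systems
--         ('supply', 'price'): 'market_mechanism',
--         ('demand', 'price'): 'market_mechanism',
--
--         # Biological systems
--         ('population', 'resources'): 'ecological_balance',
--         ('predator', 'prey'): 'predator_prey_cycle',
--
--         # Chemical systems
--         ('concentration', 'reaction_rate'): 'chemical_kinetics',
--         ('temperature', 'reaction_rate'): 'arrhenius_relationship'
--     }
--
--     # Check for domain pattern matches
--     for (qty1, qty2), relationship_type in domain_patterns.items():
--         # Check both forward and reverse patterns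
--         for qty1_name in qty_names:
--             for qty2_name in qty_names:
--                 if (qty1.lower() in qty1_name.lower() and qty2.lower() in qty2_name.lower()) or \
--                    (qty2.lower() in qty1_name.lower() and qty1.lower() in qty2_name.lower()):
--                     domain_rels[f"{qty1_name}_domain_relation_{qty2_name}"] = relationship_type
--
--     return domain_rels
-- ===== SOURCE B (Python) =====
-- def _infer_domain_relationships(qty_names):
--     """Infer relationships based on domain-specific knowledge patterns."""
--     domain_patterns = [
--         (('temperature', 'pressure'), 'thermal_relationship'),
--         (('flow_rate', 'pressure'), 'fluid_dynamics'),
--         (('speed', 'kinetic_energy'), 'mechanical_energy'),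
--         (('supply', 'price'), 'market_mechanism'),
--         (('demand', 'price'), 'market_mechanism'),
--         (('population', 'resources'), 'ecological_balance'),
--         (('predator', 'prey'), 'predator_prey_cycle'),
--         (('concentration', 'reaction_rate'), 'chemical_kinetics'),
--         (('temperature', 'reaction_rate'), 'arrhenius_relationship'),
--     ]
--     # lowercase every name once, then per pattern index the matching names
--     lowered = [(n, n.lower()) for n in qty_names]
--     domain_rels = {}
--     for (q1, q2), rel in domain_patterns:
--         m1 = [n for n, ln in lowered if q1 in ln]
--         m2 = [n for n, ln in lowered if q2 in ln]
--         mu = [n for n, ln in lowered if q1 in ln or q2 in ln]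
--         for a, la in lowered:
--             if q1 in la:
--                 bs = mu if q2 in la else m2
--             elif q2 in la:
--                 bs = m1
--             else:
--                 continue
--             for b in bs:
--                 domain_rels[a + "_domain_relation_" + b] = rel
--     return domain_rels
-- ===== Notes on version B (the rewrite author's own statement) =====
-- stated objective: faster
-- what changed: Instead of testing every (name,name) pair against each pattern with repeated .lower() calls, B lowercases each name once and per pattern builds the index lists of names containing each keyword, then emits keys only over the matching names in the same insertion order.
import Mathlib
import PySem

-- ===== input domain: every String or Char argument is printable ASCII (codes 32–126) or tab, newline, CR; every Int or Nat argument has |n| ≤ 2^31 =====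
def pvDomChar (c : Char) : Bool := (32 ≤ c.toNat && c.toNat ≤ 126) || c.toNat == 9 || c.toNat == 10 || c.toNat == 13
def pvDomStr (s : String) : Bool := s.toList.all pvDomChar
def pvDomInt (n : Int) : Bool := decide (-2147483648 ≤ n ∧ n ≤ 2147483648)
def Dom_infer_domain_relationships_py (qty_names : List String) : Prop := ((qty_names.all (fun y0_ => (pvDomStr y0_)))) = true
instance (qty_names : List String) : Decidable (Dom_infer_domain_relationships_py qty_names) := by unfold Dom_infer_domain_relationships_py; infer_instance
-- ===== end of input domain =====

-- B replaces A's per-pattern brute-force scan over all name pairs (with repeated lowering)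
-- by one lowering pass plus per-pattern index lists of the matching names; objective: faster.

-- the hardcoded pattern table, shared data of both ports
def pvPatterns : List ((String × String) × String) :=
  [(("temperature", "pressure"), "thermal_relationship"),
   (("flow_rate", "pressure"), "fluid_dynamics"),
   (("speed", "kinetic_energy"), "mechanical_energy"),
   (("supply", "price"), "market_mechanism"),
   (("demand", "price"), "market_mechanism"),
   (("population", "resources"), "ecological_balance"),
   (("predator", "prey"), "predator_prey_cycle"),
   (("concentration", "reaction_rate"), "chemical_kinetics"),
   (("temperature", "reaction_rate"), "arrhenius_relationship")]

-- ===== PORT A =====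
def infer_domain_relationships_py (qty_names : List String) : List (String × String) :=
  (pvPatterns.foldl (fun (d : PySem.Dict String String) (p : (String × String) × String) =>
      qty_names.foldl (fun d qty1_name =>
        qty_names.foldl (fun d qty2_name =>
          if (PySem.Str.isIn (PySem.Str.lower p.1.1) (PySem.Str.lower qty1_name) &&
                PySem.Str.isIn (PySem.Str.lower p.1.2) (PySem.Str.lower qty2_name)) ||
             (PySem.Str.isIn (PySem.Str.lower p.1.2) (PySem.Str.lower qty1_name) &&
                PySem.Str.isIn (PySem.Str.lower p.1.1) (PySem.Str.lower qty2_name))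
          then d.insert (qty1_name ++ "_domain_relation_" ++ qty2_name) p.2
          else d) d) d)
    PySem.Dict.empty).items

-- ===== PORT B =====
def infer_domain_relationships_py_alt (qty_names : List String) : List (String × String) :=
  let lowered := qty_names.map (fun n => (n, PySem.Str.lower n))
  (pvPatterns.foldl (fun (d : PySem.Dict String String) (p : (String × String) × String) =>
      let m1 := (lowered.filter (fun x => PySem.Str.isIn p.1.1 x.2)).map (·.1)
      let m2 := (lowered.filter (fun x => PySem.Str.isIn p.1.2 x.2)).map (·.1)
      let mu := (lowered.filter (fun x =>
                   PySem.Str.isIn p.1.1 x.2 || PySem.Str.isIn p.1.2 x.2)).map (·.1)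
      lowered.foldl (fun d x =>
        if PySem.Str.isIn p.1.1 x.2 then
          (if PySem.Str.isIn p.1.2 x.2 then mu else m2).foldl
            (fun d b => d.insert (x.1 ++ "_domain_relation_" ++ b) p.2) d
        else if PySem.Str.isIn p.1.2 x.2 then
          m1.foldl (fun d b => d.insert (x.1 ++ "_domain_relation_" ++ b) p.2) d
        else d) d)
    PySem.Dict.empty).items

-- ===== PRECONDITION & SPEC =====
def Spec_infer_domain_relationships_py (qty_names : List String) (out : List (String × String)) : Prop := out = infer_domain_relationships_py_alt qty_names
instance (qty_names : List String) (out : List (String × String)) : Decidable (Spec_infer_domain_relationships_py qty_names out) := by unfold Spec_infer_domain_relationships_py; infer_instance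

-- ===== CLAIM (what is proved, stated in full; the proofs are below) =====
def Claim_equal_infer_domain_relationships_py : Prop := ∀ (qty_names : List String), Dom_infer_domain_relationships_py qty_names → Spec_infer_domain_relationships_py qty_names (infer_domain_relationships_py qty_names)

-- ===== LEMMAS AND PROOFS =====

-- B's per-pattern index list, read back as a plain filter of the names
theorem pv_index_list (names : List String) (p : String × String → Bool) :
    ((names.map (fun n => (n, PySem.Str.lower n))).filter p).map (fun x => x.1)
      = names.filter (fun n => p (n, PySem.Str.lower n)) := by
  simp [List.filter_map, List.map_map, Function.comp_def]

-- A's inner pair loop for one pattern equals B's index-list emission, for one fixed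
-- first name a and keywords q1 q2 (already lowercase).
theorem pv_inner_eq (names : List String) (q1 q2 rel a : String)
    (d : PySem.Dict String String) :
    names.foldl (fun d b =>
        if (PySem.Str.isIn q1 (PySem.Str.lower a) && PySem.Str.isIn q2 (PySem.Str.lower b)) ||
           (PySem.Str.isIn q2 (PySem.Str.lower a) && PySem.Str.isIn q1 (PySem.Str.lower b))
        then d.insert (a ++ "_domain_relation_" ++ b) rel else d) d
    =
    (if PySem.Str.isIn q1 (PySem.Str.lower a) then
      (if PySem.Str.isIn q2 (PySem.Str.lower a) then
          ((names.map (fun n => (n, PySem.Str.lower n))).filter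
            (fun x => PySem.Str.isIn q1 x.2 || PySem.Str.isIn q2 x.2)).map (·.1)
        else
          ((names.map (fun n => (n, PySem.Str.lower n))).filter
            (fun x => PySem.Str.isIn q2 x.2)).map (·.1)).foldl
        (fun d b => d.insert (a ++ "_domain_relation_" ++ b) rel) d
    else if PySem.Str.isIn q2 (PySem.Str.lower a) then
      (((names.map (fun n => (n, PySem.Str.lower n))).filter
          (fun x => PySem.Str.isIn q1 x.2)).map (·.1)).foldl
        (fun d b => d.insert (a ++ "_domain_relation_" ++ b) rel) d
    else d) := by
  cases hc1 : PySem.Str.isIn q1 (PySem.Str.lower a) <;>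
    cases hc2 : PySem.Str.isIn q2 (PySem.Str.lower a) <;>
    simp only [hc1, hc2, Bool.true_and, Bool.false_and, Bool.or_false, Bool.false_or,
      Bool.false_eq_true, if_true, if_false, pv_index_list]
  · -- a matches neither keyword : nothing is inserted
    exact PySem.List.foldl_ignore ..
  · -- a matches only q2 : pair condition is isIn q1 (lower b) (B emits over m1)
    rw [PySem.List.foldl_if_eq_foldl_filter]
  · -- a matches only q1 : pair condition is isIn q2 (lower b) (B emits over m2)
    rw [PySem.List.foldl_if_eq_foldl_filter]
  · -- a matches both : pair condition is the or of the two tests (B emits over mu)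
    rw [PySem.List.foldl_if_eq_foldl_filter]
    congr 1
    exact List.filter_congr (fun x _ => by rw [Bool.or_comm])

-- one full pattern step of A equals one full pattern step of B (keywords already lowercase)
theorem pv_step_eq (names : List String) (q1 q2 rel : String)
    (hq1 : PySem.Str.lower q1 = q1) (hq2 : PySem.Str.lower q2 = q2)
    (d : PySem.Dict String String) :
    names.foldl (fun d a =>
      names.foldl (fun d b =>
        if (PySem.Str.isIn (PySem.Str.lower q1) (PySem.Str.lower a) &&
              PySem.Str.isIn (PySem.Str.lower q2) (PySem.Str.lower b)) ||
           (PySem.Str.isIn (PySem.Str.lower q2) (PySem.Str.lower a) &&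
              PySem.Str.isIn (PySem.Str.lower q1) (PySem.Str.lower b))
        then d.insert (a ++ "_domain_relation_" ++ b) rel else d) d) d
    =
    (names.map (fun n => (n, PySem.Str.lower n))).foldl (fun d x =>
      if PySem.Str.isIn q1 x.2 then
        (if PySem.Str.isIn q2 x.2 then
            ((names.map (fun n => (n, PySem.Str.lower n))).filter
              (fun x => PySem.Str.isIn q1 x.2 || PySem.Str.isIn q2 x.2)).map (·.1)
          else
            ((names.map (fun n => (n, PySem.Str.lower n))).filter
              (fun x => PySem.Str.isIn q2 x.2)).map (·.1)).foldl
          (fun d b => d.insert (x.1 ++ "_domain_relation_" ++ b) rel) d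
      else if PySem.Str.isIn q2 x.2 then
        (((names.map (fun n => (n, PySem.Str.lower n))).filter
            (fun x => PySem.Str.isIn q1 x.2)).map (·.1)).foldl
          (fun d b => d.insert (x.1 ++ "_domain_relation_" ++ b) rel) d
      else d) d := by
  rw [List.foldl_map, hq1, hq2]
  apply PySem.List.foldl_congr_mem
  intro acc a _
  exact pv_inner_eq names q1 q2 rel a acc

-- ===== VERDICT (by name: the statement is the Claim_ definition above) =====
theorem infer_domain_relationships_py_spec : Claim_equal_infer_domain_relationships_py := by
  intro qty_names _
  show infer_domain_relationships_py qty_names = infer_domain_relationships_py_alt qty_names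
  simp only [infer_domain_relationships_py, infer_domain_relationships_py_alt, pvPatterns]
  congr 1
  apply PySem.List.foldl_congr_mem
  intro acc p hp
  fin_cases hp <;>
    exact pv_step_eq qty_names _ _ _ (by decide) (by decide) acc
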